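-- pv_equiv track=rewrite | github.com/johnmiltontoppo567-alt/python-practice | basics/perfect_number.py | check_pre_num
-- ===== SOURCE A (Python) =====
-- def check_pre_num(n):
--     sum=0
--     for i in range(1,n-1):
--         if i%2==0:
--             sum=sum+i
--     if sum == n:
--         return True
--     else:
--         return False
-- ===== SOURCE B (Python) =====
-- def check_pre_num(n):
--     # closed form: evens in range(1, n-1) are 2,4,...,2m with m=(n-2)//2; their sum is m*(m+1)
--     if n < 3:
--         return n == 0
--     m = (n - 2) // 2
--     return m * (m + 1) == n
-- ===== Notes on version B (the rewrite author's own statement) =====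
-- stated objective: faster
-- what changed: Replaced A's loop summing even numbers below n-1 with the closed-form arithmetic-series value m*(m+1), m=(n-2)//2, compared to n.
import Mathlib
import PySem

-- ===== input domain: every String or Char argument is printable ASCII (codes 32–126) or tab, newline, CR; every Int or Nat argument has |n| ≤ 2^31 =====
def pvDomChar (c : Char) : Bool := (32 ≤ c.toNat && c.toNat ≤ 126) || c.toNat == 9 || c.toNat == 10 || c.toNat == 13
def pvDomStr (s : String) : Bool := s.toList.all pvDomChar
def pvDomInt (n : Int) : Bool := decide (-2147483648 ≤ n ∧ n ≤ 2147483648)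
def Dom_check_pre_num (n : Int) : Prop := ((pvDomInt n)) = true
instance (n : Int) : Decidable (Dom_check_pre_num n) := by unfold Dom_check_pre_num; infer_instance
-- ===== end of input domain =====

-- B replaces A's O(n) loop over range(1, n-1) by the closed arithmetic-series formula m*(m+1) with m=(n-2)//2 (O(1)).

-- ===== PORT A =====
def check_pre_num (n : Int) : Bool :=
  let sum := (PySem.List.pyRange 1 (n - 1) 1).foldl
    (fun s i => if PySem.Int.mod i 2 == 0 then s + i else s) 0
  if sum == n then true else false

-- ===== PORT B =====
def check_pre_num_alt (n : Int) : Bool :=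
  if n < 3 then n == 0
  else
    let m := PySem.Int.floordiv (n - 2) 2
    m * (m + 1) == n

-- ===== PRECONDITION & SPEC =====
def Spec_check_pre_num (n : Int) (out : Bool) : Prop := out = check_pre_num_alt n
instance (n : Int) (out : Bool) : Decidable (Spec_check_pre_num n out) := by unfold Spec_check_pre_num; infer_instance

-- ===== CLAIM (what is proved, stated in full; the proofs are below) =====
def Claim_equal_check_pre_num : Prop := ∀ (n : Int), Dom_check_pre_num n → Spec_check_pre_num n (check_pre_num n)

-- ===== LEMMAS AND PROOFS =====

-- sum of even numbers in [1, k) equals m*(m+1) with m = (k-2+1)/2 = (k-1)/2 (Euclidean division; k ≥ 1 so nonneg)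
theorem pvSumEvens (k : Nat) :
    (PySem.List.pyRange 1 (k : Int) 1).foldl
      (fun s i => if PySem.Int.mod i 2 == 0 then s + i else s) 0
    = (((k : Int) - 1) / 2) * ((((k : Int) - 1) / 2) + 1) := by
  induction k with
  | zero => decide
  | succ k ih =>
    rcases Nat.eq_zero_or_pos k with hk | hk
    · subst hk; decide
    · have h1 : (1 : Int) ≤ (k : Int) := by exact_mod_cast hk
      have hsplit : PySem.List.pyRange 1 ((k : Int) + 1) 1
          = PySem.List.pyRange 1 (k : Int) 1 ++ [(k : Int)] :=
        PySem.List.pyRange_one_succ_right h1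
      push_cast
      rw [hsplit, List.foldl_append, ih]
      simp only [List.foldl]
      have hmod : PySem.Int.mod (k : Int) 2 = (k : Int) % 2 :=
        PySem.Int.mod_eq_emod_of_pos (by omega)
      rcases Int.emod_two_eq_zero_or_one (k : Int) with he | he
      · rw [hmod, he]
        simp only [beq_self_eq_true, if_true]
        obtain ⟨j, hj⟩ : ∃ j : Int, (k : Int) = 2 * j := ⟨(k:Int)/2, by omega⟩
        have e1 : ((k : Int) - 1) / 2 = j - 1 := by omega
        have e2 : ((k : Int) + 1 - 1) / 2 = j := by omega
        rw [e1, e2, hj]; ring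
      · rw [hmod, he]
        simp only [show ((1:Int) == 0) = false from rfl, Bool.false_eq_true, if_false]
        obtain ⟨j, hj⟩ : ∃ j : Int, (k : Int) = 2 * j + 1 := ⟨(k:Int)/2, by omega⟩
        have e1 : ((k : Int) - 1) / 2 = j := by omega
        have e2 : ((k : Int) + 1 - 1) / 2 = j := by omega
        rw [e1, e2]

-- ===== VERDICT (by name: the statement is the Claim_ definition above) =====
theorem check_pre_num_spec : Claim_equal_check_pre_num := by
  intro n _
  unfold Spec_check_pre_num check_pre_num check_pre_num_alt
  by_cases h : n < 3
  · have hnil : PySem.List.pyRange 1 (n - 1) 1 = [] :=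
      PySem.List.pyRange_one_eq_nil (by omega)
    rw [hnil]
    simp only [List.foldl_nil, if_pos h]
    by_cases h0 : n = 0
    · subst h0; decide
    · simp only [beq_iff_eq]
      rw [if_neg (by omega)]
      symm
      rw [beq_eq_false_iff_ne]
      exact fun hh => h0 hh
  · have h3 : (3 : Int) ≤ n := by omega
    have hk : ∃ k : Nat, (k : Int) = n - 1 := ⟨(n-1).toNat, by omega⟩
    obtain ⟨k, hkn⟩ := hk
    rw [← hkn, pvSumEvens k, hkn]
    rw [if_neg h]
    have hfd : PySem.Int.floordiv (n - 2) 2 = (n - 2) / 2 :=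
      PySem.Int.floordiv_eq_ediv_of_pos (by omega)
    have he : (n - 1 - 1) / 2 = (n - 2) / 2 := by ring_nf
    rw [he, hfd]
    cases hb : ((n - 2) / 2 * ((n - 2) / 2 + 1) == n) <;> simp [hb]
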